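-- pv_equiv track=rewrite | github.com/xiaowucn/Scriber-Backend | remarkable/predictor/szse_poc_predictor/models/institutions_concerned.py | parser_regions_for_organization
-- ===== SOURCE A (Python) =====
-- def parser_regions_for_organization(
--     organization_tags,
-- ):
--     regions = []
--     region = None
--     for ridx, tag in enumerate(organization_tags):
--         if ridx == 0 or (tag == "organization"):
--             # start a new region
--             region = [ridx, ridx]
--             regions.append(region)
--         else:
--             region[1] = ridx
--
--     return regions
-- ===== SOURCE B (Python) =====
-- def parser_regions_for_organization(
--     organization_tags,
-- ):
--     if not organization_tags:
--         return []
--     n = len(organization_tags)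
--     starts = [0] + [i for i in range(n) if i != 0 and organization_tags[i] == "organization"]
--     ends = starts[1:] + [n]
--     return [[s, e - 1] for s, e in zip(starts, ends)]
-- ===== Notes on version B (the rewrite author's own statement) =====
-- stated objective: alternative
-- what changed: Replaces the single incremental pass that mutates the open region's end index with a two-phase decomposition: first collect all region start indices, then emit closed intervals by pairing consecutive starts.
import Mathlib
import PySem

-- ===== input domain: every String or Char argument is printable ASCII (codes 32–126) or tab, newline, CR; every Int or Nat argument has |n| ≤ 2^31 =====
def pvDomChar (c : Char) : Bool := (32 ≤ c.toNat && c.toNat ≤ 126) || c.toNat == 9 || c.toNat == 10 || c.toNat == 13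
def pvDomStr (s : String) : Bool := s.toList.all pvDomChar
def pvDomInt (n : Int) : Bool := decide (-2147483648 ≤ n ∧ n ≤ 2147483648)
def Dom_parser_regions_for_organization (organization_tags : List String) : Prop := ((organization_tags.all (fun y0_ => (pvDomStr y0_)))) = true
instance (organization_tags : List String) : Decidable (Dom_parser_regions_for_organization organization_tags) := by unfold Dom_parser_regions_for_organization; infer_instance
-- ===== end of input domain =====

-- ===== PORT A =====
-- One honest line: B computes the same regions by collecting all start indices first and
-- pairing consecutive starts into closed intervals, instead of mutating an open region (objective: alternative).

-- A-side helpers: the loop keeps (finished regions, current open region); Python's regions list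
-- holds the current region by reference, so it is appended at finalization here (same values).
def pvOptList (o : Option (Int × Int)) : List (Int × Int) :=
  match o with
  | none => []
  | some r => [r]

def pvALoop (i : Nat) (regions : List (Int × Int)) (region : Option (Int × Int)) :
    List String → List (Int × Int) × Option (Int × Int)
  | [] => (regions, region)
  | t :: ts =>
    if i = 0 ∨ t = "organization" then
      pvALoop (i + 1) (regions ++ pvOptList region) (some ((i : Int), (i : Int))) ts
    else
      pvALoop (i + 1) regions (region.map (fun r => (r.1, (i : Int)))) ts

def parser_regions_for_organization (organization_tags : List String) : List (List Int) :=
  let st := pvALoop 0 [] none organization_tags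
  (st.1 ++ pvOptList st.2).map (fun r => [r.1, r.2])

-- ===== PORT B =====
-- indexing organization_tags[i] with i drawn from range(n) is always in range, so getD is exact here
def parser_regions_for_organization_alt (organization_tags : List String) : List (List Int) :=
  if organization_tags = [] then []
  else
    let n := organization_tags.length
    let starts : List Int :=
      0 :: ((List.range n).filter
        (fun i => i ≠ 0 ∧ organization_tags.getD i "" = "organization")).map (fun (i : Nat) => (i : Int))
    let ends : List Int := starts.tail ++ [(n : Int)]
    (starts.zip ends).map (fun p => [p.1, p.2 - 1])

-- ===== PRECONDITION & SPEC =====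
def Spec_parser_regions_for_organization (organization_tags : List String) (out : List (List Int)) : Prop := out = parser_regions_for_organization_alt organization_tags
instance (organization_tags : List String) (out : List (List Int)) : Decidable (Spec_parser_regions_for_organization organization_tags out) := by unfold Spec_parser_regions_for_organization; infer_instance

-- ===== CLAIM (what is proved, stated in full; the proofs are below) =====
def Claim_equal_parser_regions_for_organization : Prop := ∀ (organization_tags : List String), Dom_parser_regions_for_organization organization_tags → Spec_parser_regions_for_organization organization_tags (parser_regions_for_organization organization_tags)

-- ===== LEMMAS AND PROOFS =====

-- common intermediate form: current region started at s, next index i (i ≥ 1)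
def goA (s : Int) (i : Nat) : List String → List (List Int)
  | [] => [[s, (i : Int) - 1]]
  | t :: ts => if t = "organization" then [s, (i : Int) - 1] :: goA (i : Int) (i + 1) ts
               else goA s (i + 1) ts

def startsFrom (i : Nat) : List String → List Int
  | [] => []
  | t :: ts => (if t = "organization" then [(i : Int)] else []) ++ startsFrom (i + 1) ts

def pairs : List Int → Int → List (List Int)
  | [], _ => []
  | [s], n => [[s, n - 1]]
  | s :: s' :: rest, n => [s, s' - 1] :: pairs (s' :: rest) n

theorem pvOptList_some (r : Int × Int) : pvOptList (some r) = [r] := rfl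

theorem pvALoop_eq_goA (ts : List String) : ∀ (i : Nat) (s : Int) (regs : List (Int × Int)),
    i ≠ 0 →
    ((pvALoop i regs (some (s, (i : Int) - 1)) ts).1
        ++ pvOptList (pvALoop i regs (some (s, (i : Int) - 1)) ts).2).map (fun r => [r.1, r.2])
      = regs.map (fun r => [r.1, r.2]) ++ goA s i ts := by
  induction ts with
  | nil => intro i s regs hi; simp [pvALoop, pvOptList, goA]
  | cons t ts ih =>
    intro i s regs hi
    have h2 : (((i + 1 : Nat)) : Int) - 1 = (i : Int) := by push_cast; ring
    by_cases ht : t = "organization"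
    · simp only [pvALoop, hi, ht, if_true, or_true, goA, pvOptList_some]
      have h := ih (i + 1) (i : Int) (regs ++ [(s, (i : Int) - 1)]) (Nat.succ_ne_zero i)
      rw [h2] at h
      rw [h]
      simp
    · simp only [pvALoop, hi, ht, or_self, if_false, goA, Option.map_some]
      have h := ih (i + 1) s regs (Nat.succ_ne_zero i)
      rw [h2] at h
      exact h

theorem zip_eq_pairs (starts : List Int) (n : Int) :
    (starts.zip (starts.tail ++ [n])).map (fun p => [p.1, p.2 - 1]) = pairs starts n := by
  induction starts with
  | nil => simp [pairs]
  | cons s rest ih =>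
    cases rest with
    | nil => simp [pairs]
    | cons s' rest' =>
      simp only [List.tail_cons, pairs]
      rw [← ih]
      simp

theorem range_filter_eq_startsFrom (ts : List String) : ∀ (off : Nat),
    ((List.range ts.length).filter (fun j => ts.getD j "" = "organization")).map
      (fun (j : Nat) => ((j : Int) + (off : Int))) = startsFrom off ts := by
  induction ts with
  | nil => intro off; simp [startsFrom]
  | cons t ts ih =>
    intro off
    rw [List.length_cons, List.range_succ_eq_map, List.filter_cons]
    have hfm : ((List.range ts.length).map Nat.succ).filter
        (fun j => decide ((t :: ts).getD j "" = "organization"))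
        = ((List.range ts.length).filter (fun j => ts.getD j "" = "organization")).map Nat.succ := by
      simp only [List.filter_map]
      rfl
    have htail : (((List.range ts.length).filter
        (fun j => ts.getD j "" = "organization")).map Nat.succ).map
          (fun (j : Nat) => ((j : Int) + (off : Int)))
        = startsFrom (off + 1) ts := by
      rw [List.map_map, ← ih (off + 1)]
      apply List.map_congr_left
      intro j _
      simp only [Function.comp_apply, Nat.succ_eq_add_one]
      push_cast
      ring
    by_cases ht : t = "organization"
    · rw [List.getD_cons_zero, if_pos (by simp [ht]), List.map_cons, hfm, htail]
      simp [startsFrom, ht]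
    · rw [List.getD_cons_zero, if_neg (by simp [ht]), hfm, htail]
      simp [startsFrom, ht]

theorem goA_eq_pairs (ts : List String) : ∀ (i : Nat) (s : Int),
    goA s i ts = pairs (s :: startsFrom i ts) ((i : Int) + (ts.length : Int)) := by
  induction ts with
  | nil => intro i s; simp [goA, startsFrom, pairs]
  | cons t ts ih =>
    intro i s
    by_cases ht : t = "organization"
    · simp only [goA, startsFrom, ht, if_true, List.singleton_append, pairs]
      rw [ih (i + 1) (i : Int)]
      congr 1
      push_cast [List.length_cons]; ring_nf
    · simp only [goA, startsFrom, ht, if_false, List.nil_append]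
      rw [ih (i + 1) s]
      congr 1
      push_cast [List.length_cons]; ring_nf

-- ===== VERDICT (by name: the statement is the Claim_ definition above) =====
theorem parser_regions_for_organization_spec : Claim_equal_parser_regions_for_organization := by
  intro ts _
  unfold Spec_parser_regions_for_organization
  cases ts with
  | nil => rfl
  | cons t rest =>
    have hA : parser_regions_for_organization (t :: rest) = goA 0 1 rest := by
      have h := pvALoop_eq_goA rest 1 0 [] one_ne_zero
      simp only [parser_regions_for_organization, pvALoop, pvOptList] at *
      simpa using h
    have hstarts : ((List.range (t :: rest).length).filter
        (fun i => i ≠ 0 ∧ (t :: rest).getD i "" = "organization")).map (fun (i : Nat) => (i : Int))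
        = startsFrom 1 rest := by
      rw [List.length_cons, List.range_succ_eq_map, List.filter_cons,
        if_neg (by simp), List.filter_map, List.map_map,
        ← range_filter_eq_startsFrom rest 1]
      have hp : (List.range rest.length).filter
          ((fun i => decide (i ≠ 0 ∧ (t :: rest).getD i "" = "organization")) ∘ Nat.succ)
          = (List.range rest.length).filter (fun j => decide (rest.getD j "" = "organization")) :=
        List.filter_congr (by intro j _; simp)
      rw [hp]
      apply List.map_congr_left
      intro j _
      simp only [Function.comp_apply, Nat.succ_eq_add_one]
      push_cast
      ring
    have hB : parser_regions_for_organization_alt (t :: rest)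
        = pairs (0 :: startsFrom 1 rest) (((t :: rest).length : Int)) := by
      simp only [parser_regions_for_organization_alt, if_neg (List.cons_ne_nil t rest)]
      rw [hstarts, zip_eq_pairs]
    rw [hA, hB, goA_eq_pairs rest 1 0]
    congr 1
    push_cast [List.length_cons]; ring_nf
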